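-- pv_equiv track=rewrite | github.com/abdulmajid18/data_structures | Searching/General_Searching/firstElementWhichIsRepeated.py | firstRepeatedSort
-- ===== SOURCE A (Python) =====
-- def firstRepeatedSort(A):
--     A.sort()
--     for i, v in enumerate(A):
--         for j, d in enumerate(A):
--             if i != j and v == d:
--                 return f" Index: {i} and  value: {v}"
--     return "No repeated!"
--     """
--     Note sorting is not permited because
--     the order of the will change after sorting
--     """
-- ===== SOURCE B (Python) =====
-- def firstRepeatedSort(A):
--     A.sort()
--     for i, (x, y) in enumerate(zip(A, A[1:])):
--         if x == y:
--             return f" Index: {i} and  value: {x}"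
--     return "No repeated!"
-- ===== Notes on version B (the rewrite author's own statement) =====
-- stated objective: faster
-- what changed: After the in-place sort, B replaces A's nested full-list scans with a single pass over adjacent pairs (zip of the list with its tail), since duplicates are adjacent in a sorted list.
import Mathlib
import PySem

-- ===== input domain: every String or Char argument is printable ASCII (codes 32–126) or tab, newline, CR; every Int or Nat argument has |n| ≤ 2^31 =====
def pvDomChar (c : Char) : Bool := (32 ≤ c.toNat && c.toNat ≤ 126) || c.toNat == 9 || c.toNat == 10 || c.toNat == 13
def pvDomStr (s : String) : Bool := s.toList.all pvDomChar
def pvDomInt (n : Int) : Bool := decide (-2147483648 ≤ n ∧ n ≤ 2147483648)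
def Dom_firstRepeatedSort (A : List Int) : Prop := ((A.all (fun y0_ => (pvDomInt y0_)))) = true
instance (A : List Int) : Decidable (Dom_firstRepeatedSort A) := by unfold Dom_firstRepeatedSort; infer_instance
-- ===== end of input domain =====

-- B replaces A's nested O(n^2) scan after the sort by a single adjacent-pair scan
-- (O(n log n) overall). Both Pythons sort the argument list in place (same mutation);
-- the equivalence proved here is about the return value.


-- ===== PORT A =====
-- f" Index: {i} and  value: {v}"
def pvMsgA (i : Int) (v : Int) : String :=
  " Index: " ++ PySem.Int.toStr i ++ " and  value: " ++ PySem.Int.toStr v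

-- inner loop: "for j, d in enumerate(A): if i != j and v == d: return …"
def pvInnerA (E : List (Int × Int)) (i v : Int) : Option String :=
  match E with
  | [] => none
  | (j, d) :: rest => if i ≠ j ∧ v = d then some (pvMsgA i v) else pvInnerA rest i v

-- outer loop: "for i, v in enumerate(A): …"  (falls through to "No repeated!")
def pvOuterA (L E : List (Int × Int)) : String :=
  match L with
  | [] => "No repeated!"
  | (i, v) :: rest =>
    match pvInnerA E i v with
    | some s => s
    | none => pvOuterA rest E

def firstRepeatedSort (A : List Int) : String :=
  let S := PySem.List.sorted A (fun x => x) false      -- A.sort()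
  pvOuterA (PySem.List.enumerate S) (PySem.List.enumerate S)

-- ===== PORT B =====
-- "for i, (x, y) in enumerate(zip(A, A[1:])): if x == y: return f" Index: {i} and  value: {x}""
def pvScanB (P : List (Int × (Int × Int))) : String :=
  match P with
  | [] => "No repeated!"
  | (i, (x, y)) :: rest =>
    if x = y then " Index: " ++ PySem.Int.toStr i ++ " and  value: " ++ PySem.Int.toStr x
    else pvScanB rest

def firstRepeatedSort_alt (A : List Int) : String :=
  let S := PySem.List.sorted A (fun x => x) false      -- A.sort()
  pvScanB (PySem.List.enumerate (S.zip (PySem.List.slice S (some 1) none)))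

-- ===== PRECONDITION & SPEC =====
def Spec_firstRepeatedSort (A : List Int) (out : String) : Prop := out = firstRepeatedSort_alt A
instance (A : List Int) (out : String) : Decidable (Spec_firstRepeatedSort A out) := by unfold Spec_firstRepeatedSort; infer_instance

-- ===== CLAIM (what is proved, stated in full; the proofs are below) =====
def Claim_equal_firstRepeatedSort : Prop := ∀ (A : List Int), Dom_firstRepeatedSort A → Spec_firstRepeatedSort A (firstRepeatedSort A)

-- ===== LEMMAS AND PROOFS =====

-- first adjacent duplicate of a list, with its index and value (proof-side device)
def pvFd : List Int → Option (Nat × Int)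
  | x :: y :: t => if x = y then some (0, x) else (pvFd (y :: t)).map (fun p => (p.1 + 1, p.2))
  | _ => none

lemma pvInnerA_hit (S : List Int) (s i v : Int) (k : Nat) (hk : k < S.length)
    (hne : i ≠ s + k) (hv : v = S[k]) :
    pvInnerA (PySem.List.enumerate S s) i v = some (pvMsgA i v) := by
  induction S generalizing s k with
  | nil => simp at hk
  | cons x xs ih =>
    rw [PySem.List.enumerate_cons]
    cases k with
    | zero =>
      simp only [List.getElem_cons_zero] at hv
      simp only [pvInnerA]
      rw [if_pos ⟨by omega, hv⟩]
    | succ k' =>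
      simp only [List.getElem_cons_succ] at hv
      simp only [pvInnerA]
      split_ifs with h
      · rfl
      · exact ih (s + 1) k' (by simpa using hk) (by push_cast at hne ⊢; omega) hv

lemma pvInnerA_none (S : List Int) (s i v : Int)
    (h : ∀ k : Nat, (hk : k < S.length) → i = s + k ∨ v ≠ S[k]) :
    pvInnerA (PySem.List.enumerate S s) i v = none := by
  induction S generalizing s with
  | nil => rw [PySem.List.enumerate_nil]; rfl
  | cons x xs ih =>
    rw [PySem.List.enumerate_cons]
    simp only [pvInnerA]
    have h0 := h 0 (by simp)
    simp only [List.getElem_cons_zero] at h0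
    rw [if_neg (by
      rintro ⟨hne, hv⟩
      rcases h0 with h1 | h1
      · exact hne (by omega)
      · exact h1 hv)]
    exact ih (s + 1) (fun k hk => by
      have := h (k + 1) (by simpa using hk)
      push_cast at this ⊢
      rcases this with h1 | h1
      · left; omega
      · right; simpa using h1)

lemma sorted_get_mono (S : List Int) (hs : S.Pairwise (· ≤ ·)) (a b : Nat)
    (hab : a ≤ b) (hb : b < S.length) : S[a]'(by omega) ≤ S[b] := by
  rcases lt_or_eq_of_le hab with h | h
  · exact List.pairwise_iff_getElem.mp hs a b (by omega) hb h
  · subst h; exact le_refl _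

lemma pvOuterA_run (S : List Int) (hs : S.Pairwise (· ≤ ·)) :
    ∀ (t : List Int) (m : Nat), S.drop m = t →
    (∀ k : Nat, k < m → (h : k + 1 < S.length) → S[k]'(by omega) ≠ S[k + 1]) →
    pvOuterA (PySem.List.enumerate t (m : Int)) (PySem.List.enumerate S) =
      (match pvFd t with
       | some (k, x) => pvMsgA ((m : Int) + (k : Int)) x
       | none => "No repeated!") := by
  intro t
  induction t with
  | nil => intro m _ _; rw [PySem.List.enumerate_nil]; rfl
  | cons v rest ih =>
    intro m hdrop hstrict
    have hm : m < S.length := by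
      by_contra h
      rw [List.drop_eq_nil_of_le (by omega)] at hdrop
      exact (List.cons_ne_nil v rest) hdrop.symm
    have hSm : S[m] = v := by
      have h0 : (S.drop m)[0]? = S[m + 0]? := List.getElem?_drop
      rw [hdrop] at h0
      simp only [Nat.add_zero, List.getElem?_cons_zero] at h0
      have := h0.symm
      rw [List.getElem?_eq_getElem hm] at this
      exact Option.some.inj this
    have hdrop' : S.drop (m + 1) = rest := by
      rw [← List.tail_drop, hdrop]; rfl
    rw [PySem.List.enumerate_cons]
    simp only [pvOuterA]
    by_cases hadj : ∃ r', rest = v :: r'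
    · -- adjacent duplicate right here
      obtain ⟨r', hr⟩ := hadj
      have hm1 : m + 1 < S.length := by
        have : (S.drop (m+1)).length = S.length - (m+1) := List.length_drop ..
        rw [hdrop', hr] at this
        simp at this; omega
      have hSm1 : S[m + 1] = v := by
        have h0 : (S.drop (m+1))[0]? = S[(m+1) + 0]? := List.getElem?_drop
        rw [hdrop', hr] at h0
        simp only [Nat.add_zero, List.getElem?_cons_zero] at h0
        have := h0.symm
        rw [List.getElem?_eq_getElem hm1] at this
        exact Option.some.inj this
      rw [pvInnerA_hit S 0 (m : Int) v (m + 1) hm1 (by push_cast; omega)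
        (by rw [hSm1])]
      subst hr
      simp only [pvFd]
      norm_num
    · -- no hit at index m: every equal value elsewhere is ruled out by sortedness
      have hnone : pvInnerA (PySem.List.enumerate S) (m : Int) v = none := by
        apply pvInnerA_none
        intro k hk
        by_cases hkm : k = m
        · left; simp [hkm]
        · right
          intro hvk
          rcases Nat.lt_or_ge k m with hlt | hge
          · -- k < m : S[k] = S[k+1], contradicting the strict prefix
            have h1 : S[k]'(by omega) ≤ S[k+1]'(by omega) :=
              sorted_get_mono S hs k (k+1) (by omega) (by omega)
            have h2 : S[k+1]'(by omega) ≤ S[m] :=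
              sorted_get_mono S hs (k+1) m (by omega) hm
            exact hstrict k hlt (by omega) (by omega)
          · -- k > m : forces S[m+1] = v, contradicting ¬hadj
            have hmk : m < k := by omega
            have hm1 : m + 1 < S.length := by omega
            have h1 : S[m] ≤ S[m+1] := sorted_get_mono S hs m (m+1) (by omega) hm1
            have h2 : S[m+1] ≤ S[k] := sorted_get_mono S hs (m+1) k (by omega) hk
            have hSm1 : S[m+1] = v := by omega
            have h0 : (S.drop (m+1))[0]? = S[(m+1) + 0]? := List.getElem?_drop
            rw [hdrop'] at h0
            simp only [Nat.add_zero] at h0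
            rw [List.getElem?_eq_getElem hm1, hSm1] at h0
            have := h0
            cases rest with
            | nil => simp at this
            | cons w r' =>
              simp at this
              exact hadj ⟨r', by rw [this]⟩
      rw [hnone]
      have hrec := ih (m + 1) hdrop' (by
        intro k hkm1 hk1
        by_cases hkm : k = m
        · intro hEq
          simp only [hkm] at hEq hk1
          have h0 : (S.drop (m+1))[0]? = S[(m+1) + 0]? := List.getElem?_drop
          rw [hdrop'] at h0
          simp only [Nat.add_zero] at h0
          rw [List.getElem?_eq_getElem hk1, ← hEq, hSm] at h0
          have := h0
          cases rest with
          | nil => simp at this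
          | cons w r' =>
            simp at this
            exact hadj ⟨r', by rw [this]⟩
        · exact hstrict k (by omega) hk1)
      push_cast at hrec
      rw [hrec]
      cases rest with
      | nil => rfl
      | cons w r' =>
        have hwv : ¬ (v = w) := fun h => hadj ⟨r', by rw [h]⟩
        simp only [pvFd, if_neg hwv]
        cases pvFd (w :: r') with
        | none => rfl
        | some p =>
          simp only [Option.map_some]
          have : ((m : Int) + 1) + (p.1 : Int) = (m : Int) + ((p.1 + 1 : Nat) : Int) := by
            push_cast; ring
          rw [this]

lemma pvScanB_run (t : List Int) : ∀ m : Int,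
    pvScanB (PySem.List.enumerate (t.zip t.tail) m) =
      (match pvFd t with
       | some (k, x) => pvMsgA (m + (k : Int)) x
       | none => "No repeated!") := by
  induction t with
  | nil =>
    intro m
    simp only [List.tail_nil, List.zip_nil_left]
    rw [PySem.List.enumerate_nil]; rfl
  | cons x xs ih =>
    intro m
    cases xs with
    | nil =>
      simp only [List.tail_cons, List.zip_nil_right]
      rw [PySem.List.enumerate_nil]; rfl
    | cons y r =>
      simp only [List.tail_cons, List.zip_cons_cons]
      rw [PySem.List.enumerate_cons]
      simp only [pvScanB, pvFd]
      split_ifs with h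
      · subst h; norm_num [pvMsgA]
      · have := ih (m + 1)
        simp only [List.tail_cons] at this
        rw [this]
        cases pvFd (y :: r) with
        | none => rfl
        | some p =>
          simp only [Option.map_some]
          have : (m + 1) + (p.1 : Int) = m + ((p.1 + 1 : Nat) : Int) := by push_cast; ring
          rw [this]

-- ===== VERDICT (by name: the statement is the Claim_ definition above) =====
theorem firstRepeatedSort_spec : Claim_equal_firstRepeatedSort := by
  intro A _
  have key : ∀ S : List Int, S.Pairwise (· ≤ ·) →
      pvOuterA (PySem.List.enumerate S) (PySem.List.enumerate S) =
      pvScanB (PySem.List.enumerate (S.zip (PySem.List.slice S (some 1) none))) := by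
    intro S hs
    rw [PySem.List.slice_from_one]
    have hA := pvOuterA_run S hs S 0 (by simp) (by omega)
    have hB := pvScanB_run S 0
    simp only [Nat.cast_zero] at hA
    rw [hA, hB]
  exact key (PySem.List.sorted A (fun x => x) false)
    (PySem.List.sorted_pairwise A (fun x => x))
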